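-- pv_equiv track=rewrite | github.com/populationgenomics/hail-elasticsearch-pipelines | batch_seqr_loader/test/test_simulate_sm_worklfow.py | sample_id_format
-- ===== SOURCE A (Python) =====
-- from typing import Union, List
--
-- def sample_id_format(sample_id: Union[int, List[int]]):
--     """
--     Transform raw (int) sample identifier to format (CPGXXXH) where:
--         - CPG is the prefix
--         - H is the Luhn checksum
--         - XXX is the original identifier
--
--     >>> sample_id_format(10)
--     'CPG109'
--
--     >>> sample_id_format(12345)
--     'CPG123455'
--     """
--
--     if isinstance(sample_id, list):
--         return [sample_id_format(s) for s in sample_id]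
--
--     if isinstance(sample_id, str) and not sample_id.isdigit():
--         if sample_id.startswith('CPG'):
--             return sample_id
--         raise ValueError(f'Unexpected format for sample identifier "{sample_id}"')
--     sample_id = int(sample_id)
--
--     return f'CPG{sample_id}{luhn_compute(sample_id)}'
--
-- def luhn_compute(n):
--     """
--     Compute Luhn check digit of number given as string
--
--     >>> luhn_compute(453201511283036)
--     6
--
--     >>> luhn_compute(601151443354620)
--     1
--
--     >>> luhn_compute(677154949558680)
--     2
--     """
--     m = [int(d) for d in reversed(str(n))]
--     result = sum(m) + sum(d + (d >= 5) for d in m[::2])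
--     return -result % 10
-- ===== SOURCE B (Python) =====
-- from typing import Union, List
--
--
-- def luhn_check_digit(n):
--     """Textbook Luhn check digit: double every second digit from the right."""
--     total = 0
--     double = True
--     for ch in reversed(str(n)):
--         d = int(ch)
--         if double:
--             d *= 2
--             if d > 9:
--                 d -= 9
--         total += d
--         double = not double
--     return (10 - total % 10) % 10
--
--
-- def sample_id_format(sample_id: Union[int, List[int]]):
--     if isinstance(sample_id, list):
--         return [sample_id_format(s) for s in sample_id]
--
--     if isinstance(sample_id, str) and not sample_id.isdigit():
--         if sample_id.startswith('CPG'):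
--             return sample_id
--         raise ValueError(f'Unexpected format for sample identifier "{sample_id}"')
--     sample_id = int(sample_id)
--
--     return f'CPG{sample_id}{luhn_check_digit(sample_id)}'
-- ===== Notes on version B (the rewrite author's own statement) =====
-- stated objective: idiomatic
-- what changed: luhn_compute's algebraic trick (sum of all digits plus a correction for large digits over the even-position slice, then a negated sum modulo ten) is replaced by the textbook Luhn loop: walk the reversed digit string with a doubling toggle, double every second digit (taking the digit sum of a two-digit double) and derive the check digit from the total modulo ten.
import Mathlib
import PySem

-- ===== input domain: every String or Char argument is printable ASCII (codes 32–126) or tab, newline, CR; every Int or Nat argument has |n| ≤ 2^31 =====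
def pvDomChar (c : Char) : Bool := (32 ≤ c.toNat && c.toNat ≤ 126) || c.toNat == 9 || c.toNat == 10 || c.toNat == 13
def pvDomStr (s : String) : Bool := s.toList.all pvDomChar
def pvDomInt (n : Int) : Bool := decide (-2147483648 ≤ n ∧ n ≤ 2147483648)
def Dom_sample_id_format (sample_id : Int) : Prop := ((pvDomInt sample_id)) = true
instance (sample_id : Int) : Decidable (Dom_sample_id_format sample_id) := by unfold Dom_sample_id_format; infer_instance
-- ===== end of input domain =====

-- B replaces A's algebraic Luhn trick (digit sum plus a correction for large digits on every
-- second position) with the textbook Luhn loop (explicitly double every second digit from the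
-- right, taking the digit sum of a two-digit double); objective: idiomatic, same cost.

-- ===== PORT A =====
-- int(d) for a single character d; none (Python ValueError, e.g. on the '-' of a negative
-- number's str) is excluded by Pre_sample_id_format, so getD 0 is never reached on admitted inputs.
def pyDigit (c : Char) : Int := (PySem.Int.ofChars? [c]).getD 0

def sample_id_format (sample_id : Int) : String :=
  -- luhn_compute inlined: m = [int(d) for d in reversed(str(n))]
  let m : List Int := (PySem.Int.toChars sample_id).reverse.map pyDigit
  -- result = sum(m) + sum(d + (d >= 5) for d in m[::2]); step 2 ≠ 0, so slice? is never none
  let result : Int :=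
    m.sum + (((PySem.List.slice? m none none 2).getD []).map
      (fun d => d + (if 5 ≤ d then 1 else 0))).sum
  -- f'CPG{sample_id}{-result % 10}'
  "CPG" ++ PySem.Int.toStr sample_id ++ PySem.Int.toStr (PySem.Int.mod (-result) 10)

-- ===== PORT B =====
-- one step of B's loop over the reversed digit string: state (total, double)
def luhnStep (acc : Int × Bool) (c : Char) : Int × Bool :=
  let d := pyDigit c
  let d := if acc.2 then (let d2 := d * 2; if d2 > 9 then d2 - 9 else d2) else d
  (acc.1 + d, !acc.2)

def sample_id_format_alt (sample_id : Int) : String :=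
  let total : Int := ((PySem.Int.toChars sample_id).reverse.foldl luhnStep (0, true)).1
  let check : Int := PySem.Int.mod (10 - PySem.Int.mod total 10) 10
  "CPG" ++ PySem.Int.toStr sample_id ++ PySem.Int.toStr check

-- ===== PRECONDITION & SPEC =====
-- On negative sample_id both Pythons raise ValueError (int('-') inside the digit loop);
-- Pre_ excludes exactly those inputs.
def Pre_sample_id_format (sample_id : Int) : Prop := 0 ≤ sample_id
instance (sample_id : Int) : Decidable (Pre_sample_id_format sample_id) := by
  unfold Pre_sample_id_format; infer_instance
def pvWitness_sample_id_format : Int := 10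

def Spec_sample_id_format (sample_id : Int) (out : String) : Prop := out = sample_id_format_alt sample_id
instance (sample_id : Int) (out : String) : Decidable (Spec_sample_id_format sample_id out) := by unfold Spec_sample_id_format; infer_instance

-- ===== CLAIM (what is proved, stated in full; the proofs are below) =====
def Claim_equal_sample_id_format : Prop := ∀ (sample_id : Int), Dom_sample_id_format sample_id → Pre_sample_id_format sample_id → Spec_sample_id_format sample_id (sample_id_format sample_id)

-- ===== LEMMAS AND PROOFS =====

-- every second element (xs[::2]), by two-step structural recursion
def eo {α : Type} : List α → List α
  | [] => []
  | [a] => [a]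
  | a :: _ :: t => a :: eo t

theorem filt_eo (xs : List Int) :
    List.filterMap (fun x => xs[2*x]?) (List.range ((xs.length+1)/2)) = eo xs := by
  induction xs using eo.induct with
  | case1 => simp [eo]
  | case2 a => simp [eo, List.range_succ]
  | case3 a b t ih =>
    simp only [eo, List.length_cons]
    have h2 : (t.length + 1 + 1 + 1) / 2 = (t.length + 1) / 2 + 1 := by omega
    rw [h2, List.range_succ_eq_map, List.filterMap_cons, List.filterMap_map]
    simp only [List.getElem?_cons_zero, Nat.mul_zero]
    have hsh : ∀ x : Nat, ((a :: b :: t)[2*(x+1)]? ) = t[2*x]? := by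
      intro x
      have : 2*(x+1) = 2*x + 1 + 1 := by omega
      rw [this]; simp
    simp only [Function.comp_def, hsh, ih]

theorem slice2_char (xs : List Int) : PySem.List.slice? xs none none 2 = some (eo xs) := by
  rw [← filt_eo]
  simp [PySem.List.slice?, PySem.List.sliceIndices]
  have hc : (if 0 < xs.length then (((xs.length:Int) + 2 - 1) / 2).toNat else 0) = (xs.length+1)/2 := by
    split_ifs with h <;> omega
  have hf : ∀ x : Nat, ((2*(x:Int)).toNat) = 2*x := by intro x; omega
  simp [hc, hf]

-- A's total, written as an alternating recursion over the digit list
def aTot : Bool → List Int → Int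
  | _, [] => 0
  | true, d :: r => (2*d + (if 5 ≤ d then 1 else 0)) + aTot false r
  | false, d :: r => d + aTot true r

-- B's total, same alternation with explicit doubling
def bTot : Bool → List Int → Int
  | _, [] => 0
  | true, d :: r => (if d*2 > 9 then d*2 - 9 else d*2) + bTot false r
  | false, d :: r => d + bTot true r

theorem aTot_split (m : List Int) :
    m.sum + ((eo m).map (fun d => d + (if 5 ≤ d then 1 else 0))).sum = aTot true m := by
  induction m using eo.induct with
  | case1 => simp [eo, aTot]
  | case2 a => simp only [eo, List.map_cons, List.map_nil, List.sum_cons, List.sum_nil, aTot]; ring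
  | case3 a b t ih =>
    simp only [eo, List.map_cons, List.sum_cons, aTot]
    linarith

theorem bTot_fold (cs : List Char) : ∀ (t : Int) (b : Bool),
    (cs.foldl luhnStep (t, b)).1 = t + bTot b (cs.map pyDigit) := by
  induction cs with
  | nil => intro t b; simp [bTot]
  | cons c cs ih =>
    intro t b
    cases b
    · simp only [List.foldl_cons, luhnStep, List.map_cons, bTot, Bool.not_false,
        Bool.false_eq_true, if_false, ih]
      ring
    · simp only [List.foldl_cons, luhnStep, List.map_cons, bTot, Bool.not_true, if_true, ih]
      ring

theorem tot_mod (m : List Int) : ∀ b : Bool, aTot b m % 10 = bTot b m % 10 := by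
  induction m with
  | nil => intro b; rfl
  | cons d r ih =>
    intro b
    cases b
    · simp only [aTot, bTot]
      have := ih true
      omega
    · simp only [aTot, bTot]
      have := ih false
      split_ifs with h1 h2 <;> omega

-- ===== VERDICT (by name: the statement is the Claim_ definition above) =====
theorem sample_id_format_spec : Claim_equal_sample_id_format := by
  intro n _ _
  unfold Spec_sample_id_format
  simp only [sample_id_format, sample_id_format_alt, slice2_char, Option.getD_some]
  rw [aTot_split, bTot_fold, zero_add]
  congr 2
  have hmod := tot_mod ((PySem.Int.toChars n).reverse.map pyDigit) true
  have hmf : ∀ a : Int, PySem.Int.mod a 10 = a % 10 :=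
    fun a => PySem.Int.mod_eq_emod_of_pos (by norm_num)
  simp only [hmf]
  omega
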